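-- pv_equiv track=rewrite | github.com/nagaraj556534/Quotex_Trading | app/strategy12/confluence.py | three_of_three_confluence
-- ===== SOURCE A (Python) =====
-- from typing import Dict, Any, List, Tuple
--
-- def three_of_three_confluence(signals: Dict[int, Tuple[bool, str]]) -> Tuple[bool, str]:
--     acts: List[str] = []
--     for _tf, (ok, dirn) in signals.items():
--         if ok:
--             acts.append(dirn)
--     if len(acts) < 3:
--         return False, "call"
--     if all(d == "call" for d in acts):
--         return True, "call"
--     if all(d == "put" for d in acts):
--         return True, "put"
--     return False, "call"
-- ===== SOURCE B (Python) =====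
-- from typing import Dict, Tuple
--
-- def three_of_three_confluence(signals: Dict[int, Tuple[bool, str]]) -> Tuple[bool, str]:
--     # Maintain a single running consensus direction and abort on the first
--     # disagreement; no list of directions is ever built and no rescan happens.
--     dirn = None
--     n = 0
--     for ok, d in signals.values():
--         if not ok:
--             continue
--         if dirn is not None and d != dirn:
--             return False, "call"  # mixed directions: confluence impossible
--         dirn = d
--         n += 1
--     if n >= 3 and dirn in ("call", "put"):
--         return True, dirn
--     return False, "call"
-- ===== Notes on version B (the rewrite author's own statement) =====
-- stated objective: alternative
-- what changed: A collects every active direction into a list and rescans it with two all() passes; B keeps one running consensus direction plus a count and returns immediately on the first disagreement, never materializing the list and short-circuiting on mixed input.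
import Mathlib
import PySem

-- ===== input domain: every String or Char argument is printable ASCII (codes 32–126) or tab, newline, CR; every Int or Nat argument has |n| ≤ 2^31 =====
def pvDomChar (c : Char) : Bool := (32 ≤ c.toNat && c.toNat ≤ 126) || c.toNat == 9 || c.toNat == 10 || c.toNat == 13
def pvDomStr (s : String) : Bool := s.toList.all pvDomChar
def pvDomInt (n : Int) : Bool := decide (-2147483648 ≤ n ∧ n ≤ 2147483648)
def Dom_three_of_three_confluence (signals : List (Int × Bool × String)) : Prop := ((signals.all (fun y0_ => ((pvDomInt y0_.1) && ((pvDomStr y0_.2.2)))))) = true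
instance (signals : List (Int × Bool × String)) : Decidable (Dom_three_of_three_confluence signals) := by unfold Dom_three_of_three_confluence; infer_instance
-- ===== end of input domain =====

-- B replaces A's collect-all-then-rescan (acts list + two all() passes) with a single
-- early-exiting pass that tracks one running consensus direction and a count.


-- ===== PORT A =====
def three_of_three_confluence (signals : List (Int × Bool × String)) : Bool × String :=
  let acts : List String :=
    signals.foldl (fun acc s => if s.2.1 then acc ++ [s.2.2] else acc) []
  if acts.length < 3 then (false, "call")
  else if acts.all (fun d => d == "call") then (true, "call")
  else if acts.all (fun d => d == "put") then (true, "put")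
  else (false, "call")

-- ===== PORT B =====
-- transliteration of Source B's loop with early return: recursion over the list,
-- carrying the consensus direction (Option String) and the active count.
def pvScan : List (Int × Bool × String) → Option String → Int → Bool × String
  | [], dirn, n =>
      if decide (3 ≤ n) && (dirn == some "call" || dirn == some "put") then
        (true, dirn.getD "call")
      else (false, "call")
  | s :: rest, dirn, n =>
      if !s.2.1 then pvScan rest dirn n
      else
        match dirn with
        | some d0 =>
            if s.2.2 != d0 then (false, "call")
            else pvScan rest (some s.2.2) (n + 1)
        | none => pvScan rest (some s.2.2) (n + 1)

def three_of_three_confluence_alt (signals : List (Int × Bool × String)) : Bool × String :=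
  pvScan signals none 0

-- ===== PRECONDITION & SPEC =====
def Spec_three_of_three_confluence (signals : List (Int × Bool × String)) (out : Bool × String) : Prop := out = three_of_three_confluence_alt signals
instance (signals : List (Int × Bool × String)) (out : Bool × String) : Decidable (Spec_three_of_three_confluence signals out) := by unfold Spec_three_of_three_confluence; infer_instance

-- ===== CLAIM (what is proved, stated in full; the proofs are below) =====
def Claim_equal_three_of_three_confluence : Prop := ∀ (signals : List (Int × Bool × String)), Dom_three_of_three_confluence signals → Spec_three_of_three_confluence signals (three_of_three_confluence signals)

-- ===== LEMMAS AND PROOFS =====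

-- the directions of the active signals (what A's loop collects)
def pvActs (signals : List (Int × Bool × String)) : List String :=
  (signals.filter (fun s => s.2.1)).map (fun s => s.2.2)

-- A's final decision as a function of the collected directions
def pvDecide (m : List String) : Bool × String :=
  if m.length < 3 then (false, "call")
  else if m.all (fun d => d == "call") then (true, "call")
  else if m.all (fun d => d == "put") then (true, "put")
  else (false, "call")

theorem foldA_eq (l : List (Int × Bool × String)) (acc : List String) :
    l.foldl (fun acc s => if s.2.1 then acc ++ [s.2.2] else acc) acc = acc ++ pvActs l := by
  induction l generalizing acc with
  | nil => simp [pvActs]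
  | cons h t ih =>
      by_cases hb : h.2.1 <;> simp [pvActs, List.foldl, hb, ih] at *

theorem A_eq (l : List (Int × Bool × String)) :
    three_of_three_confluence l = pvDecide (pvActs l) := by
  unfold three_of_three_confluence pvDecide
  rw [foldA_eq]
  simp

-- once a consensus direction d is held, pvScan succeeds iff every remaining
-- active direction equals d and the final tally reaches 3
theorem scan_some (l : List (Int × Bool × String)) (d : String) (n : Int) :
    pvScan l (some d) n =
      if (pvActs l).all (fun e => e == d) then
        (if decide (3 ≤ n + ((pvActs l).length : Int)) && (d == "call" || d == "put") then
          (true, d)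
        else (false, "call"))
      else (false, "call") := by
  induction l generalizing d n with
  | nil => simp [pvScan, pvActs]
  | cons h t ih =>
      by_cases hb : h.2.1
      · by_cases he : h.2.2 = d
        · simp only [pvScan, hb, Bool.not_true, Bool.false_eq_true, if_false, he,
            bne_self_eq_false, ih]
          simp only [pvActs, List.filter_cons, hb, if_pos, List.map_cons,
            List.all_cons, List.length_cons, he, beq_self_eq_true, Bool.true_and]
          have : n + 1 + (((t.filter (fun s => s.2.1)).map (fun s => s.2.2)).length : Int)
              = n + ((((t.filter (fun s => s.2.1)).map (fun s => s.2.2)).length : Int) + 1) := by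
            ring
          simp only [Nat.cast_add, Nat.cast_one, this]
        · have hne : (h.2.2 != d) = true := by simp [he]
          have hf : ((pvActs (h :: t)).all (fun e => e == d)) = false := by
            simp [pvActs, hb, he]
          simp [pvScan, hb, hne, hf]
      · have hf : h.2.1 = false := by simpa using hb
        have hacts : pvActs (h :: t) = pvActs t := by simp [pvActs, hf]
        have hstep : pvScan (h :: t) (some d) n = pvScan t (some d) n := by
          simp [pvScan, hf]
        rw [hstep, hacts, ih]

-- the consensus/count decision after the first active direction d matches A's decision
theorem decide_cons (d : String) (m : List String) :
    (if m.all (fun e => e == d) then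
      (if decide (3 ≤ (1 : Int) + (m.length : Int)) && (d == "call" || d == "put") then
        (true, d)
      else (false, "call"))
    else (false, "call")) = pvDecide (d :: m) := by
  unfold pvDecide
  by_cases hall : (m.all (fun e => e == d)) = true
  · have hmem : ∀ e ∈ m, e = d := by
      intro e he; simpa using List.all_eq_true.mp hall e he
    rw [if_pos hall]
    by_cases h3 : (3 : Int) ≤ 1 + (m.length : Int)
    · have hlen : ¬ ((d :: m).length < 3) := by simp; omega
      rw [if_neg hlen]
      by_cases hc : d = "call"
      · have hac : ((d :: m).all (fun e => e == "call")) = true := by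
          simp only [List.all_eq_true]
          intro e he
          rcases List.mem_cons.mp he with h1 | h2
          · simp [h1, hc]
          · simp [hmem e h2, hc]
        simp [h3, hc, hac]
        exact fun x hx => (hmem x hx).trans hc
      · by_cases hp : d = "put"
        · have hac : ((d :: m).all (fun e => e == "call")) = false := by simp [hc]
          have hap : ((d :: m).all (fun e => e == "put")) = true := by
            simp only [List.all_eq_true]
            intro e he
            rcases List.mem_cons.mp he with h1 | h2
            · simp [h1, hp]
            · simp [hmem e h2, hp]
          simp [h3, hc, hp, hac, hap]
          exact fun x hx => (hmem x hx).trans hp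
        · have hac : ((d :: m).all (fun e => e == "call")) = false := by simp [hc]
          have hap : ((d :: m).all (fun e => e == "put")) = false := by simp [hp]
          simp [hc, hp, hac, hap]
    · have hlen : ((d :: m).length < 3) := by simp; omega
      simp [hlen, h3]
      intro hcon
      exfalso
      omega
  · rw [if_neg hall]
    have hex : ∃ e ∈ m, ¬ e = d := by
      by_contra hcon
      push_neg at hcon
      exact hall (List.all_eq_true.mpr fun e he => by simp [hcon e he])
    obtain ⟨e, hem, hed⟩ := hex
    have hac : ((d :: m).all (fun e => e == "call")) = false := by
      by_cases hc : d = "call"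
      · refine List.all_eq_false.mpr ⟨e, List.mem_cons_of_mem _ hem, ?_⟩
        subst hc; simpa using hed
      · simp [hc]
    have hap : ((d :: m).all (fun e => e == "put")) = false := by
      by_cases hp : d = "put"
      · refine List.all_eq_false.mpr ⟨e, List.mem_cons_of_mem _ hem, ?_⟩
        subst hp; simpa using hed
      · simp [hp]
    simp only [hac, hap, Bool.false_eq_true, if_false]
    split_ifs <;> rfl

-- the whole-run correspondence: A's decision on the collected list = B's scan
theorem scan_eq_decide (signals : List (Int × Bool × String)) :
    pvDecide (pvActs signals) = pvScan signals none 0 := by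
  induction signals with
  | nil => simp [pvScan, pvDecide, pvActs]
  | cons h t ih =>
      by_cases hb : h.2.1
      · have hstep : pvScan (h :: t) none 0 = pvScan t (some h.2.2) 1 := by
          simp [pvScan, hb]
        have hacts : pvActs (h :: t) = h.2.2 :: pvActs t := by simp [pvActs, hb]
        rw [hstep, scan_some, hacts]
        exact (decide_cons h.2.2 (pvActs t)).symm
      · have hf : h.2.1 = false := by simpa using hb
        have hstep : pvScan (h :: t) none 0 = pvScan t none 0 := by simp [pvScan, hf]
        have hacts : pvActs (h :: t) = pvActs t := by simp [pvActs, hf]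
        rw [hacts, hstep, ih]

-- ===== VERDICT (by name: the statement is the Claim_ definition above) =====
theorem three_of_three_confluence_spec : Claim_equal_three_of_three_confluence := by
  intro signals _
  unfold Spec_three_of_three_confluence three_of_three_confluence_alt
  rw [A_eq, scan_eq_decide]
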